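-- pv_equiv track=rewrite | github.com/CyrilMa/HawkEye | lines_3d.py | get_horizontal_lines
-- ===== SOURCE A (Python) =====
-- bottom_delta = 30
--
-- middle_delta = 20
--
-- def get_horizontal_lines(lines):
--     """
--     :param lines: array of lines
--     :return: the indexes corresponding the major horizontal lines in the image
--     """
--     max_y1_y2 = 0
--     second_max_y1_y2 = 0
--     third_max_y1_y2 = 0
--     index_max = 0
--     index_second_max = 0
--     index_third_max = 0
--     index_fourth_max = 0
--     fourth_max_y1_y2 = 0
--
--     # looking for bottom line
--     for i in range(len(lines)):
--         for x1, y1, x2, y2 in lines[i]: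
--             if (x1-x2)**2 > (y1-y2)**2:
--                 if int((y1+y2)/2) > max_y1_y2:
--                     max_y1_y2 = int((y1+y2)/2)
--                     index_max = i
--
--     # looking for middle line
--     for i in range(len(lines)):
--         for x1, y1, x2, y2 in lines[i]:
--             if (x1 - x2) ** 2 > (y1 - y2) ** 2:
--                 if max_y1_y2 - bottom_delta > int((y1+y2)/2) > second_max_y1_y2:
--                     second_max_y1_y2 = int((y1+y2)/2)
--                     index_second_max = i
--
--     # looking for upper line (the line formed by the bottom of the net)
--     for i in range(len(lines)):
--         for x1, y1, x2, y2 in lines[i]: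
--             if (x1 - x2) ** 2 > (y1 - y2) ** 2:
--                 if second_max_y1_y2 - middle_delta > int((y1+y2)/2) > third_max_y1_y2:
--                     third_max_y1_y2 = int((y1+y2)/2)
--                     index_third_max = i
--
--     # looking for fond line
--     for i in range(len(lines)):
--         for x1, y1, x2, y2 in lines[i]:
--             if (x1 - x2) ** 2 > (y1 - y2) ** 2:
--                 if third_max_y1_y2 - middle_delta > int((y1+y2)/2) > fourth_max_y1_y2:
--                     fourth_max_y1_y2 = int((y1+y2)/2)
--                     index_fourth_max = i
--
--     return index_max, index_second_max, index_third_max, index_fourth_max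
-- ===== SOURCE B (Python) =====
-- bottom_delta = 30
--
-- middle_delta = 20
--
--
-- def get_horizontal_lines(lines):
--     """
--     :param lines: array of lines
--     :return: the indexes corresponding the major horizontal lines in the image
--     """
--     cands = sorted(
--         ((int((y1 + y2) / 2), i)
--          for i, segs in enumerate(lines)
--          for x1, y1, x2, y2 in segs
--          if (x1 - x2) ** 2 > (y1 - y2) ** 2),
--         key=lambda t: (-t[0], t[1]))
--
--     def pick(upper):
--         return next(((m, i) for m, i in cands
--                      if m > 0 and (upper is None or m < upper)), (0, 0))
--
--     m1, i1 = pick(None)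
--     m2, i2 = pick(m1 - bottom_delta)
--     m3, i3 = pick(m2 - middle_delta)
--     m4, i4 = pick(m3 - middle_delta)
--     return i1, i2, i3, i4
-- ===== Notes on version B (the rewrite author's own statement) =====
-- stated objective: alternative
-- what changed: Instead of A's four separate full scans over the nested segment lists, each tracking a running maximum, B collects the (midpoint, index) candidates once, sorts them by (-midpoint, index), and obtains each of the four lines as the first sorted entry strictly below the previous bound (and above 0).
import Mathlib
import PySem

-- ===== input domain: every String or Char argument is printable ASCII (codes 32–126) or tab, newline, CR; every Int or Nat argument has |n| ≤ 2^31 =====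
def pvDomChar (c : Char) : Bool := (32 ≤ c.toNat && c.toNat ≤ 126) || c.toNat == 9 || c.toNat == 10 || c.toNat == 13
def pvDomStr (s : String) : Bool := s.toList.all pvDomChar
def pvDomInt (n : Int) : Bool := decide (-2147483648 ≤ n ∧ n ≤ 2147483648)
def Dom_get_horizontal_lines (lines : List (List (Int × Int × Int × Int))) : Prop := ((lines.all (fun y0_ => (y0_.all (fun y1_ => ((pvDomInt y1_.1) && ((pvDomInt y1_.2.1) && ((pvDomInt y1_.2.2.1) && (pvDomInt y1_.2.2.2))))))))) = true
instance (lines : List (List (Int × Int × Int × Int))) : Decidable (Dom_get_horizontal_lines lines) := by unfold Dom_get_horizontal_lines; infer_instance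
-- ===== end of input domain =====

-- B replaces A's four full scans of the nested segment lists by one candidate-collection pass,
-- a sort by (-midpoint, index), and four first-hit scans of the sorted list (objective: alternative).

-- ===== PORT A =====
def pvBottomDelta : Int := 30
def pvMiddleDelta : Int := 20

def get_horizontal_lines (lines : List (List (Int × Int × Int × Int))) : Int × Int × Int × Int :=
  -- looking for bottom line: state (max_y1_y2, index_max)
  let r1 : Int × Int :=
    (PySem.List.pyRange 0 (PySem.List.len lines) 1).foldl (fun s i =>
      (PySem.List.pyGetD lines i []).foldl (fun s q =>
        match q with
        | (x1, y1, x2, y2) =>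
          if (x1 - x2) ^ 2 > (y1 - y2) ^ 2 then
            if PySem.Int.truncdiv (y1 + y2) 2 > s.1 then (PySem.Int.truncdiv (y1 + y2) 2, i)
            else s
          else s) s) (0, 0)
  -- looking for middle line: state (second_max_y1_y2, index_second_max)
  let r2 : Int × Int :=
    (PySem.List.pyRange 0 (PySem.List.len lines) 1).foldl (fun s i =>
      (PySem.List.pyGetD lines i []).foldl (fun s q =>
        match q with
        | (x1, y1, x2, y2) =>
          if (x1 - x2) ^ 2 > (y1 - y2) ^ 2 then
            if r1.1 - pvBottomDelta > PySem.Int.truncdiv (y1 + y2) 2 ∧ PySem.Int.truncdiv (y1 + y2) 2 > s.1 then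
              (PySem.Int.truncdiv (y1 + y2) 2, i)
            else s
          else s) s) (0, 0)
  -- looking for upper line: state (third_max_y1_y2, index_third_max)
  let r3 : Int × Int :=
    (PySem.List.pyRange 0 (PySem.List.len lines) 1).foldl (fun s i =>
      (PySem.List.pyGetD lines i []).foldl (fun s q =>
        match q with
        | (x1, y1, x2, y2) =>
          if (x1 - x2) ^ 2 > (y1 - y2) ^ 2 then
            if r2.1 - pvMiddleDelta > PySem.Int.truncdiv (y1 + y2) 2 ∧ PySem.Int.truncdiv (y1 + y2) 2 > s.1 then
              (PySem.Int.truncdiv (y1 + y2) 2, i)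
            else s
          else s) s) (0, 0)
  -- looking for fond line: state (fourth_max_y1_y2, index_fourth_max)
  let r4 : Int × Int :=
    (PySem.List.pyRange 0 (PySem.List.len lines) 1).foldl (fun s i =>
      (PySem.List.pyGetD lines i []).foldl (fun s q =>
        match q with
        | (x1, y1, x2, y2) =>
          if (x1 - x2) ^ 2 > (y1 - y2) ^ 2 then
            if r3.1 - pvMiddleDelta > PySem.Int.truncdiv (y1 + y2) 2 ∧ PySem.Int.truncdiv (y1 + y2) 2 > s.1 then
              (PySem.Int.truncdiv (y1 + y2) 2, i)
            else s
          else s) s) (0, 0)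
  (r1.2, r2.2, r3.2, r4.2)

-- ===== PORT B =====
-- (int((y1+y2)/2), i) for every near-horizontal segment, in original order
def pvCands (lines : List (List (Int × Int × Int × Int))) : List (Int × Int) :=
  (PySem.List.enumerate lines).flatMap (fun p =>
    (p.2.filter (fun q => decide ((q.1 - q.2.2.1) ^ 2 > (q.2.1 - q.2.2.2) ^ 2))).map
      (fun q => (PySem.Int.truncdiv (q.2.1 + q.2.2.2) 2, p.1)))

-- "upper is None or m < upper"
def pvBnd (upper : Option Int) (m : Int) : Bool :=
  match upper with
  | none => true
  | some u => decide (m < u)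

-- "m > 0 and (upper is None or m < upper)"
def pvQual (upper : Option Int) (c : Int × Int) : Bool :=
  decide (0 < c.1) && pvBnd upper c.1

-- next(((m, i) for m, i in cands if m > 0 and (upper is None or m < upper)), (0, 0))
def pvPick (cands : List (Int × Int)) (upper : Option Int) : Int × Int :=
  (cands.find? (pvQual upper)).getD (0, 0)

def get_horizontal_lines_alt (lines : List (List (Int × Int × Int × Int))) : Int × Int × Int × Int :=
  let cands := PySem.List.sorted2 (pvCands lines) (fun t => -t.1) (fun t => t.2)
  let r1 := pvPick cands none
  let r2 := pvPick cands (some (r1.1 - pvBottomDelta))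
  let r3 := pvPick cands (some (r2.1 - pvMiddleDelta))
  let r4 := pvPick cands (some (r3.1 - pvMiddleDelta))
  (r1.2, r2.2, r3.2, r4.2)

-- ===== PRECONDITION & SPEC =====
def Spec_get_horizontal_lines (lines : List (List (Int × Int × Int × Int))) (out : Int × Int × Int × Int) : Prop := out = get_horizontal_lines_alt lines
instance (lines : List (List (Int × Int × Int × Int))) (out : Int × Int × Int × Int) : Decidable (Spec_get_horizontal_lines lines out) := by unfold Spec_get_horizontal_lines; infer_instance

-- ===== CLAIM (what is proved, stated in full; the proofs are below) =====
def Claim_equal_get_horizontal_lines : Prop := ∀ (lines : List (List (Int × Int × Int × Int))), Dom_get_horizontal_lines lines → Spec_get_horizontal_lines lines (get_horizontal_lines lines)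

-- ===== LEMMAS AND PROOFS =====

-- one A-pass step on the flat candidate list, with the pass's upper bound as an Option
def pvStep (b : Option Int) (s c : Int × Int) : Int × Int :=
  if pvBnd b c.1 && decide (s.1 < c.1) then c else s

-- the comparison sorted2 sorts by (key (-mid, index))
def pvLtKey (a c : Int × Int) : Bool :=
  decide (-a.1 < -c.1) || (!decide (-c.1 < -a.1) && decide (a.2 < c.2))

def pvR (a c : Int × Int) : Prop := pvLtKey c a = false

-- "r is the result one pass with bound b must produce over candidates cs"
def pvIsBest (b : Option Int) (cs : List (Int × Int)) (r : Int × Int) : Prop :=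
  (r = (0, 0) ∧ ∀ c ∈ cs, pvQual b c = false) ∨
  (r ∈ cs ∧ pvQual b r = true ∧ ∀ c ∈ cs, pvQual b c = true → c.1 < r.1 ∨ (c.1 = r.1 ∧ r.2 ≤ c.2))

theorem pvIsBest_unique {b : Option Int} {cs : List (Int × Int)} {r1 r2 : Int × Int}
    (h1 : pvIsBest b cs r1) (h2 : pvIsBest b cs r2) : r1 = r2 := by
  rcases h1 with ⟨e1, hn1⟩ | ⟨hm1, hq1, ha1⟩ <;> rcases h2 with ⟨e2, hn2⟩ | ⟨hm2, hq2, ha2⟩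
  · rw [e1, e2]
  · exact absurd hq2 (by simp [hn1 _ hm2])
  · exact absurd hq1 (by simp [hn2 _ hm1])
  · have c12 := ha1 _ hm2 hq2
    have c21 := ha2 _ hm1 hq1
    have e1 : r1.1 = r2.1 := by omega
    have e2 : r1.2 = r2.2 := by omega
    exact Prod.ext e1 e2

theorem pvIsBest_perm {b : Option Int} {cs cs' : List (Int × Int)} {r : Int × Int}
    (hp : cs.Perm cs') (h : pvIsBest b cs r) : pvIsBest b cs' r := by
  rcases h with ⟨e, hn⟩ | ⟨hm, hq, ha⟩
  · exact Or.inl ⟨e, fun c hc => hn c (hp.mem_iff.mpr hc)⟩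
  · exact Or.inr ⟨hp.mem_iff.mp hm, hq, fun c hc => ha c (hp.mem_iff.mpr hc)⟩

theorem pvFold_isBest (b : Option Int) (cs : List (Int × Int))
    (h : cs.Pairwise (fun c d => c.2 ≤ d.2)) :
    pvIsBest b cs (cs.foldl (pvStep b) (0, 0)) := by
  induction cs using List.reverseRecOn with
  | nil => exact Or.inl ⟨rfl, by simp⟩
  | append_singleton ds c ih =>
    rw [List.pairwise_append] at h
    have hlast : ∀ d ∈ ds, d.2 ≤ c.2 := fun d hd => h.2.2 d hd c (by simp)
    specialize ih h.1
    rw [List.foldl_append, List.foldl_cons, List.foldl_nil]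
    set r := ds.foldl (pvStep b) (0, 0) with hr
    have hr1 : 0 ≤ r.1 := by
      rcases ih with ⟨e, _⟩ | ⟨_, hq, _⟩
      · rw [e]
      · simp [pvQual] at hq; omega
    show pvIsBest b (ds ++ [c]) (pvStep b r c)
    unfold pvStep
    by_cases hc : (pvBnd b c.1 && decide (r.1 < c.1)) = true
    · rw [if_pos hc]
      simp only [Bool.and_eq_true, decide_eq_true_iff] at hc
      right
      refine ⟨by simp, by simp [pvQual, hc.1]; omega, ?_⟩
      intro d hd hqd
      rcases List.mem_append.mp hd with hds | hdc
      · rcases ih with ⟨_, hnone⟩ | ⟨_, _, hall⟩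
        · rw [hnone d hds] at hqd; cases hqd
        · rcases hall d hds hqd with h' | h' <;> [left; left] <;> omega
      · simp only [List.mem_singleton] at hdc
        subst hdc
        exact Or.inr ⟨rfl, le_refl _⟩
    · rw [if_neg hc]
      simp only [Bool.and_eq_true, decide_eq_true_iff, not_and] at hc
      rcases ih with ⟨e, hnone⟩ | ⟨hmem, hq, hall⟩
      · left
        refine ⟨e, ?_⟩
        intro d hd
        rcases List.mem_append.mp hd with hds | hdc
        · exact hnone d hds
        · simp only [List.mem_singleton] at hdc
          subst hdc
          have : r.1 = 0 := by rw [e]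
          simp [pvQual]
          intro hpos
          by_cases hb : pvBnd b d.1 = true
          · exact absurd (hc hb) (by omega)
          · exact Bool.eq_false_iff.mpr hb
      · right
        refine ⟨List.mem_append_left _ hmem, hq, ?_⟩
        intro d hd hqd
        rcases List.mem_append.mp hd with hds | hdc
        · exact hall d hds hqd
        · simp only [List.mem_singleton] at hdc
          subst hdc
          have hb : pvBnd b d.1 = true := by
            simp [pvQual] at hqd; exact hqd.2
          have hle : d.1 ≤ r.1 := by
            have := hc hb; omega
          by_cases heq : d.1 = r.1
          · exact Or.inr ⟨heq, hlast r hmem⟩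
          · exact Or.inl (by omega)

theorem pvPick_isBest (b : Option Int) (ss : List (Int × Int)) (hp : ss.Pairwise pvR) :
    pvIsBest b ss (pvPick ss b) := by
  unfold pvPick
  cases hf : ss.find? (pvQual b) with
  | none =>
    left
    refine ⟨rfl, fun c hc => ?_⟩
    exact Bool.not_eq_true _ ▸ (List.find?_eq_none.mp hf c hc)
  | some r =>
    rw [Option.getD_some]
    right
    obtain ⟨hq, as, bs, hss, hnot⟩ := List.find?_eq_some_iff_append.mp hf
    refine ⟨List.mem_of_find?_eq_some hf, hq, ?_⟩
    intro c hc hqc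
    subst hss
    rcases List.mem_append.mp hc with hcas | hcrb
    · have := hnot c hcas
      rw [hqc] at this
      cases this
    · rcases List.mem_cons.mp hcrb with rfl | hcbs
      · exact Or.inr ⟨rfl, le_refl _⟩
      · rw [List.pairwise_append] at hp
        have hrc : pvR r c := (List.pairwise_cons.mp hp.2.1).1 c hcbs
        unfold pvR pvLtKey at hrc
        simp at hrc
        by_cases heq : c.1 = r.1
        · exact Or.inr ⟨heq, by omega⟩
        · exact Or.inl (by omega)

theorem pvLtKey_asymm {a c : Int × Int} (h : pvLtKey a c = true) : pvLtKey c a = false := by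
  simp [pvLtKey] at *
  omega

theorem pvLtKey_trans_neg {a bb c : Int × Int} (h1 : pvLtKey bb a = false) (h2 : pvLtKey c bb = false) :
    pvLtKey c a = false := by
  simp [pvLtKey] at *
  omega

theorem pvInsertBy_pairwise (x : Int × Int) (ys : List (Int × Int)) (h : ys.Pairwise pvR) :
    (PySem.List.insertBy pvLtKey x ys).Pairwise pvR := by
  induction ys with
  | nil => simp [PySem.List.insertBy, pvR]
  | cons y ys ih =>
    rw [show PySem.List.insertBy pvLtKey x (y :: ys)
        = if pvLtKey x y then x :: y :: ys else y :: PySem.List.insertBy pvLtKey x ys from rfl]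
    rcases List.pairwise_cons.mp h with ⟨hy, hys⟩
    by_cases hxy : pvLtKey x y = true
    · rw [if_pos hxy]
      refine List.pairwise_cons.mpr ⟨?_, h⟩
      intro z hz
      rcases List.mem_cons.mp hz with rfl | hz
      · exact pvLtKey_asymm hxy
      · exact pvLtKey_trans_neg (pvLtKey_asymm hxy) (hy z hz)
    · rw [if_neg hxy]
      refine List.pairwise_cons.mpr ⟨?_, ih hys⟩
      intro z hz
      rcases (PySem.List.mem_insertBy _ _ _ _).mp hz with rfl | hz
      · exact Bool.eq_false_iff.mpr hxy
      · exact hy z hz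

theorem pvFoldl_insertBy_pairwise (cs acc : List (Int × Int)) (h : acc.Pairwise pvR) :
    (cs.foldl (fun a x => PySem.List.insertBy pvLtKey x a) acc).Pairwise pvR := by
  induction cs generalizing acc with
  | nil => exact h
  | cons c cs ih => exact ih _ (pvInsertBy_pairwise c acc h)

theorem pvSorted_pairwise (cs : List (Int × Int)) :
    (PySem.List.sorted2 cs (fun t => -t.1) (fun t => t.2)).Pairwise pvR := by
  have e : PySem.List.sorted2 cs (fun t => -t.1) (fun t => t.2)
      = cs.foldl (fun a x => PySem.List.insertBy pvLtKey x a) [] := rfl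
  rw [e]
  exact pvFoldl_insertBy_pairwise cs [] (by simp)

theorem pvCands_sndMono (lines : List (List (Int × Int × Int × Int))) :
    (pvCands lines).Pairwise (fun c d => c.2 ≤ d.2) := by
  unfold pvCands
  rw [List.pairwise_flatMap]
  constructor
  · intro p _
    apply List.Pairwise.map
    · intro a b h
      exact h
    · apply List.Pairwise.filter
      exact List.pairwise_of_forall (fun _ _ => le_refl _)
  · apply List.Pairwise.imp ?_ (PySem.List.pairwise_lt_enumerate lines 0)
    intro p q hpq c hc d hd
    simp only [List.mem_map] at hc hd
    obtain ⟨_, _, rfl⟩ := hc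
    obtain ⟨_, _, rfl⟩ := hd
    exact le_of_lt hpq

theorem pvPass_eq (lines : List (List (Int × Int × Int × Int))) (b : Option Int) :
    (PySem.List.pyRange 0 (PySem.List.len lines) 1).foldl (fun s i =>
      (PySem.List.pyGetD lines i []).foldl (fun s q =>
        if (q.1 - q.2.2.1) ^ 2 > (q.2.1 - q.2.2.2) ^ 2 then
          pvStep b s (PySem.Int.truncdiv (q.2.1 + q.2.2.2) 2, i)
        else s) s) (0, 0)
    = (pvCands lines).foldl (pvStep b) (0, 0) := by
  unfold pvCands
  rw [List.foldl_flatMap]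
  rw [PySem.List.enumerate_eq_map_pyRange lines [], List.foldl_map]
  apply PySem.List.foldl_congr_mem
  intro acc i _
  dsimp only
  rw [List.foldl_map,
    PySem.List.foldl_ite_eq_foldl_filter
      (p := fun q : Int × Int × Int × Int => (q.1 - q.2.2.1) ^ 2 > (q.2.1 - q.2.2.2) ^ 2)
      (f := fun s q => pvStep b s (PySem.Int.truncdiv (q.2.1 + q.2.2.2) 2, i))]

theorem pvPass_congr_inner (b : Option Int) (i : Int) (l : List (Int × Int × Int × Int))
    (cond : Int → Int → Prop) [∀ m a, Decidable (cond m a)]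
    (hcond : ∀ m a, cond m a ↔ (pvBnd b m && decide (a < m)) = true) (acc : Int × Int) :
    l.foldl (fun s q =>
        match q with
        | (x1, y1, x2, y2) =>
          if (x1 - x2) ^ 2 > (y1 - y2) ^ 2 then
            if cond (PySem.Int.truncdiv (y1 + y2) 2) s.1 then (PySem.Int.truncdiv (y1 + y2) 2, i)
            else s
          else s) acc
    = l.foldl (fun s q =>
        if (q.1 - q.2.2.1) ^ 2 > (q.2.1 - q.2.2.2) ^ 2 then
          pvStep b s (PySem.Int.truncdiv (q.2.1 + q.2.2.2) 2, i)
        else s) acc := by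
  apply PySem.List.foldl_congr_mem
  intro s q _
  obtain ⟨x1, y1, x2, y2⟩ := q
  dsimp only
  by_cases h1 : (x1 - x2) ^ 2 > (y1 - y2) ^ 2
  · rw [if_pos h1, if_pos h1]
    unfold pvStep
    by_cases h2 : cond (PySem.Int.truncdiv (y1 + y2) 2) s.1
    · rw [if_pos h2, if_pos ((hcond _ _).mp h2)]
    · rw [if_neg h2, if_neg (fun hb => h2 ((hcond _ _).mpr hb))]
  · rw [if_neg h1, if_neg h1]

theorem pvPass_full (lines : List (List (Int × Int × Int × Int))) (b : Option Int)
    (cond : Int → Int → Prop) [∀ m a, Decidable (cond m a)]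
    (hcond : ∀ m a, cond m a ↔ (pvBnd b m && decide (a < m)) = true) :
    (PySem.List.pyRange 0 (PySem.List.len lines) 1).foldl (fun s i =>
      (PySem.List.pyGetD lines i []).foldl (fun s q =>
        match q with
        | (x1, y1, x2, y2) =>
          if (x1 - x2) ^ 2 > (y1 - y2) ^ 2 then
            if cond (PySem.Int.truncdiv (y1 + y2) 2) s.1 then (PySem.Int.truncdiv (y1 + y2) 2, i)
            else s
          else s) s) (0, 0)
    = pvPick (PySem.List.sorted2 (pvCands lines) (fun t => -t.1) (fun t => t.2)) b := by
  have e1 : (PySem.List.pyRange 0 (PySem.List.len lines) 1).foldl (fun s i =>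
      (PySem.List.pyGetD lines i []).foldl (fun s q =>
        match q with
        | (x1, y1, x2, y2) =>
          if (x1 - x2) ^ 2 > (y1 - y2) ^ 2 then
            if cond (PySem.Int.truncdiv (y1 + y2) 2) s.1 then (PySem.Int.truncdiv (y1 + y2) 2, i)
            else s
          else s) s) (0, 0)
      = (pvCands lines).foldl (pvStep b) (0, 0) := by
    refine Eq.trans ?_ (pvPass_eq lines b)
    apply PySem.List.foldl_congr_mem
    intro acc i _
    exact pvPass_congr_inner b i _ cond hcond acc
  rw [e1]
  exact pvIsBest_unique (pvFold_isBest b _ (pvCands_sndMono lines))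
    (pvIsBest_perm (PySem.List.sorted2_perm _ _ _ _)
      (pvPick_isBest b _ (pvSorted_pairwise (pvCands lines))))

-- ===== VERDICT (by name: the statement is the Claim_ definition above) =====
theorem get_horizontal_lines_spec : Claim_equal_get_horizontal_lines := by
  intro lines _dom
  show get_horizontal_lines lines = get_horizontal_lines_alt lines
  simp only [get_horizontal_lines, get_horizontal_lines_alt]
  rw [pvPass_full lines none (fun m a => m > a) (by intro m a; simp [pvBnd])]
  rw [pvPass_full lines (some ((pvPick (PySem.List.sorted2 (pvCands lines) (fun t => -t.1) (fun t => t.2)) none).1 - pvBottomDelta)) (fun m a =>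
      (pvPick (PySem.List.sorted2 (pvCands lines) (fun t => -t.1) (fun t => t.2)) none).1
        - pvBottomDelta > m ∧ m > a)
    (by intro m a; simp [pvBnd])]
  rw [pvPass_full lines (some ((pvPick (PySem.List.sorted2 (pvCands lines) (fun t => -t.1) (fun t => t.2))
        (some ((pvPick (PySem.List.sorted2 (pvCands lines) (fun t => -t.1) (fun t => t.2)) none).1 - pvBottomDelta))).1 - pvMiddleDelta)) (fun m a =>
      (pvPick (PySem.List.sorted2 (pvCands lines) (fun t => -t.1) (fun t => t.2))
        (some ((pvPick (PySem.List.sorted2 (pvCands lines) (fun t => -t.1) (fun t => t.2)) none).1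
          - pvBottomDelta))).1 - pvMiddleDelta > m ∧ m > a)
    (by intro m a; simp [pvBnd])]
  rw [pvPass_full lines (some ((pvPick (PySem.List.sorted2 (pvCands lines) (fun t => -t.1) (fun t => t.2))
        (some ((pvPick (PySem.List.sorted2 (pvCands lines) (fun t => -t.1) (fun t => t.2))
          (some ((pvPick (PySem.List.sorted2 (pvCands lines) (fun t => -t.1) (fun t => t.2)) none).1 - pvBottomDelta))).1 - pvMiddleDelta))).1 - pvMiddleDelta)) (fun m a =>
      (pvPick (PySem.List.sorted2 (pvCands lines) (fun t => -t.1) (fun t => t.2))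
        (some ((pvPick (PySem.List.sorted2 (pvCands lines) (fun t => -t.1) (fun t => t.2))
          (some ((pvPick (PySem.List.sorted2 (pvCands lines) (fun t => -t.1) (fun t => t.2)) none).1
            - pvBottomDelta))).1 - pvMiddleDelta))).1 - pvMiddleDelta > m ∧ m > a)
    (by intro m a; simp [pvBnd])]
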